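-- pv_equiv track=rewrite | github.com/bheinzerling/dougu | dougu/strings.py | token_shapes
-- ===== SOURCE A (Python) =====
-- def token_shapes(tokens, collapse=True):
--     """Returns strings which encode the shape of tokens. If collapse
--     is set, repeats are collapsed and infrequent shapes encoded as "other":
--         Aa  | capitalized
--         a   | all lowercase
--         .   | all punctuation
--         0   | all digits
--         A   | all UPPERCASE
--         0a0 | digits - lower - digits
--         %   | other
--     """
--     collapsed_shapes = {"Aa", "a", ".", "0", "A", "0a0"}
--
--     def char_shape(char):
--         if not char.isalnum():
--             return "."
--         if char.isdigit():
--             return "0"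
--         if char.isupper():
--             return "A"
--         return "a"
--
--     shapes = [[char_shape(c) for c in token] for token in tokens]
--     if collapse:
--         def _collapse(chars):
--             last = None
--             for c in chars:
--                 if c != last:
--                     yield c
--                     last = c
--     else:
--         def _collapse(chars):
--             return chars
--     shapes = ["".join(_collapse(shape)) for shape in shapes]
--     if collapse:
--         return [s if s in collapsed_shapes else "%" for s in shapes]
--     return shapes
-- ===== SOURCE B (Python) =====
-- def token_shapes(tokens, collapse=True):
--     """Shape-encode tokens. For collapse=True this classifies each token
--     directly by its (at most three) leading shape runs with early exit --
--     the collapsed shape string and the whitelist set are never built."""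
--
--     def char_shape(char):
--         if not char.isalnum():
--             return "."
--         if char.isdigit():
--             return "0"
--         if char.isupper():
--             return "A"
--         return "a"
--
--     if not collapse:
--         return ["".join(char_shape(c) for c in t) for t in tokens]
--
--     def classify(t):
--         n = len(t)
--         if n == 0:
--             return "%"
--
--         def run_end(i):
--             s = char_shape(t[i])
--             while i < n and char_shape(t[i]) == s:
--                 i += 1
--             return i
--
--         s0 = char_shape(t[0])
--         i = run_end(0)
--         if i == n:
--             return s0
--         s1 = char_shape(t[i])
--         j = run_end(i)
--         if j == n:
--             return "Aa" if s0 == "A" and s1 == "a" else "%"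
--         s2 = char_shape(t[j])
--         k = run_end(j)
--         if k == n and s0 == "0" and s1 == "a" and s2 == "0":
--             return "0a0"
--         return "%"
--
--     return [classify(t) for t in tokens]
-- ===== Notes on version B (the rewrite author's own statement) =====
-- stated objective: alternative
-- what changed: For collapse=True, B never builds the collapsed shape string nor the whitelist set: it classifies each token directly by inspecting its at most three leading shape runs (early exit on a fourth run), hard-coding the admissible run patterns A/a/./0, A+a+ and 0+a+0+.
import Mathlib
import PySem

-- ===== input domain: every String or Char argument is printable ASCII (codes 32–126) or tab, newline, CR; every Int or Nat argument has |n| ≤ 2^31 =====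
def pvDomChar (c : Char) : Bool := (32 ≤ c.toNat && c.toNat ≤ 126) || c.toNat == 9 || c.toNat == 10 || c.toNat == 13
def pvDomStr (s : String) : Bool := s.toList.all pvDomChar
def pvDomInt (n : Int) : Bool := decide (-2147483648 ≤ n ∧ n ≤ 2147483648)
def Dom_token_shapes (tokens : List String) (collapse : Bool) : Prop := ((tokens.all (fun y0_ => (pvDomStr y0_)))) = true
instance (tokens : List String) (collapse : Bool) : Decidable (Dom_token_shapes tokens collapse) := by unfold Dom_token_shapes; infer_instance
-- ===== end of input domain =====

-- B replaces A's collapse-then-whitelist pipeline by a direct run-pattern classifier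
-- (at most three leading shape runs, early exit); return-value equivalence, no speed claim.

-- char_shape, identical in both Pythons (shapes are one-char strings; ported as Char)
def charShape (c : Char) : Char :=
  if !(PySem.Chars.isalnum c) then '.'
  else if PySem.Chars.isdigit c then '0'
  else if PySem.Chars.isupper c then 'A'
  else 'a'

-- ===== PORT A =====
-- the collapsed_shapes literal of A, as lists of chars
def collapsedShapes : List (List Char) :=
  [['A','a'], ['a'], ['.'], ['0'], ['A'], ['0','a','0']]

-- A's _collapse generator (last starts as None)
def collapseGen : List Char → Option Char → List Char
  | [], _ => []
  | c :: cs, last => if some c ≠ last then c :: collapseGen cs (some c) else collapseGen cs last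

def token_shapes (tokens : List String) (collapse : Bool) : List String :=
  let shapes := tokens.map (fun token => token.toList.map charShape)
  let shapes2 := shapes.map (fun shape =>
    if collapse then collapseGen shape none else shape)
  if collapse then
    shapes2.map (fun s => if collapsedShapes.contains s then String.ofList s else "%")
  else
    shapes2.map String.ofList

-- ===== PORT B =====
-- B's run_end: skip the leading run of chars whose shape is s (returns the rest)
def skipRun (s : Char) : List Char → List Char
  | [] => []
  | c :: cs => if charShape c = s then skipRun s cs else c :: cs

-- B's classify: inspect up to three leading shape runs, early exit on a fourth
def classify (t : List Char) : String :=
  match t with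
  | [] => "%"
  | c0 :: _ =>
    let s0 := charShape c0
    match skipRun s0 t with
    | [] => String.ofList [s0]
    | c1 :: t1 =>
      let s1 := charShape c1
      match skipRun s1 (c1 :: t1) with
      | [] => if s0 = 'A' ∧ s1 = 'a' then "Aa" else "%"
      | c2 :: t2 =>
        let s2 := charShape c2
        match skipRun s2 (c2 :: t2) with
        | [] => if s0 = '0' ∧ s1 = 'a' ∧ s2 = '0' then "0a0" else "%"
        | _ :: _ => "%"

def token_shapes_alt (tokens : List String) (collapse : Bool) : List String :=
  if collapse then
    tokens.map (fun t => classify t.toList)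
  else
    tokens.map (fun t => String.ofList (t.toList.map charShape))

-- ===== PRECONDITION & SPEC =====
def Spec_token_shapes (tokens : List String) (collapse : Bool) (out : List String) : Prop := out = token_shapes_alt tokens collapse
instance (tokens : List String) (collapse : Bool) (out : List String) : Decidable (Spec_token_shapes tokens collapse out) := by unfold Spec_token_shapes; infer_instance

-- ===== CLAIM (what is proved, stated in full; the proofs are below) =====
def Claim_equal_token_shapes : Prop := ∀ (tokens : List String) (collapse : Bool), Dom_token_shapes tokens collapse → Spec_token_shapes tokens collapse (token_shapes tokens collapse)

-- ===== LEMMAS AND PROOFS =====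

-- charShape only produces the four shape characters
lemma charShape_mem (c : Char) : charShape c = '.' ∨ charShape c = '0' ∨ charShape c = 'A' ∨ charShape c = 'a' := by
  unfold charShape; split_ifs <;> simp

-- the head of skipRun's result has a different shape
lemma skipRun_head (s : Char) (cs : List Char) (c : Char) (t : List Char)
    (h : skipRun s cs = c :: t) : charShape c ≠ s := by
  induction cs with
  | nil => simp [skipRun] at h
  | cons a as ih =>
    simp only [skipRun] at h
    by_cases ha : charShape a = s
    · simp [ha] at h; exact ih h
    · simp [ha] at h; rw [← h.1]; exact ha

-- collapseGen with last = some s ignores a leading run of shape s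
lemma gen_skip (cs : List Char) (s : Char) :
    collapseGen (cs.map charShape) (some s) = collapseGen ((skipRun s cs).map charShape) (some s) := by
  induction cs with
  | nil => simp [skipRun]
  | cons c cs ih =>
    by_cases h : charShape c = s
    · simp [skipRun, collapseGen, h, ih]
    · simp [skipRun, collapseGen, h]

-- step lemma: a fresh shape is emitted
lemma gen_step (c : Char) (cs : List Char) (last : Option Char) (h : some (charShape c) ≠ last) :
    collapseGen ((c :: cs).map charShape) last
      = charShape c :: collapseGen ((skipRun (charShape c) (c :: cs)).map charShape) (some (charShape c)) := by
  simp only [List.map_cons, collapseGen, if_pos h]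
  rw [gen_skip]
  simp [skipRun]

-- the whitelist has no member of length ≥ 4
lemma contains_long (l : List Char) (h : 4 ≤ l.length) : collapsedShapes.contains l = false := by
  rcases l with _ | ⟨a, _ | ⟨b, _ | ⟨c, _ | ⟨d, l⟩⟩⟩⟩ <;> simp_all [collapsedShapes]

-- B's classify equals A's collapse-then-whitelist computation
lemma classify_eq (cs : List Char) :
    classify cs = (if collapsedShapes.contains (collapseGen (cs.map charShape) none) then
        String.ofList (collapseGen (cs.map charShape) none) else "%") := by
  cases cs with
  | nil => simp [classify, collapseGen, collapsedShapes]
  | cons c0 t =>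
    rw [gen_step c0 t none (by simp)]
    unfold classify
    rcases h1 : skipRun (charShape c0) (c0 :: t) with _ | ⟨c1, t1⟩
    · -- one run: singleton collapsed shape, always whitelisted
      rcases charShape_mem c0 with h | h | h | h <;>
        simp_all [collapsedShapes, collapseGen]
    · have hs1 : charShape c1 ≠ charShape c0 := skipRun_head _ _ _ _ h1
      rw [gen_step c1 t1 (some (charShape c0)) (by simpa using hs1)]
      rcases h2 : skipRun (charShape c1) (c1 :: t1) with _ | ⟨c2, t2⟩
      · -- two runs
        rcases charShape_mem c0 with h | h | h | h <;>
          rcases charShape_mem c1 with g | g | g | g <;>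
            simp_all [collapsedShapes, collapseGen]
      · have hs2 : charShape c2 ≠ charShape c1 := skipRun_head _ _ _ _ h2
        rw [gen_step c2 t2 (some (charShape c1)) (by simpa using hs2)]
        rcases h3 : skipRun (charShape c2) (c2 :: t2) with _ | ⟨c3, t3⟩
        · -- three runs
          rcases charShape_mem c0 with h | h | h | h <;>
            rcases charShape_mem c1 with g | g | g | g <;>
              rcases charShape_mem c2 with f | f | f | f <;>
                simp_all [collapsedShapes, collapseGen]
        · -- four or more runs: never whitelisted
          have hs3 : charShape c3 ≠ charShape c2 := skipRun_head _ _ _ _ h3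
          rw [gen_step c3 t3 (some (charShape c2)) (by simpa using hs3)]
          rw [contains_long _ (by simp)]
          simp [h1, h2, h3]

-- ===== VERDICT (by name: the statement is the Claim_ definition above) =====
theorem token_shapes_spec : Claim_equal_token_shapes := by
  intro tokens collapse _
  unfold Spec_token_shapes token_shapes token_shapes_alt
  cases collapse with
  | false => simp
  | true => simp [classify_eq]
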